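-- pv_equiv track=rewrite | github.com/wyk18703232953/myResearch | codeComplex/data/filteredData/python/nlogn/python_nlogn_0198.py | almost_difference
-- ===== SOURCE A (Python) =====
-- def almost_difference(array):
--     n = len(array)
--     if n == 1:
--         return 0
--
--     dict_equal = dict()
--     ad_sum = 0
--     prev_sum = 0
--
--     for i in range(n):
--         x = array[i]
--         if x not in dict_equal:
--             dict_equal[x] = 0
--         if x - 1 not in dict_equal:
--             dict_equal[x - 1] = 0
--         if x + 1 not in dict_equal:
--             dict_equal[x + 1] = 0
--
--         ad_sum = ad_sum + i * x - prev_sum + dict_equal[x + 1] - dict_equal[x - 1]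
--         dict_equal[x] += 1
--         prev_sum += x
--
--     return ad_sum
-- ===== SOURCE B (Python) =====
-- def almost_difference(array):
--     total = 0
--     prefix = []
--     for y in array:
--         for x in prefix:
--             if abs(y - x) != 1:
--                 total += y - x
--         prefix.append(y)
--     return total
-- ===== Notes on version B (the rewrite author's own statement) =====
-- stated objective: simpler
-- what changed: Replaces A's single-pass incremental scheme (frequency dict with zero-padded neighbor keys plus running prefix sum and index-weighted terms) by the direct definition: a nested scan over all earlier elements adding y - x for every pair whose absolute difference is not 1, with no dict and no prefix-sum bookkeeping.
import Mathlib
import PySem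

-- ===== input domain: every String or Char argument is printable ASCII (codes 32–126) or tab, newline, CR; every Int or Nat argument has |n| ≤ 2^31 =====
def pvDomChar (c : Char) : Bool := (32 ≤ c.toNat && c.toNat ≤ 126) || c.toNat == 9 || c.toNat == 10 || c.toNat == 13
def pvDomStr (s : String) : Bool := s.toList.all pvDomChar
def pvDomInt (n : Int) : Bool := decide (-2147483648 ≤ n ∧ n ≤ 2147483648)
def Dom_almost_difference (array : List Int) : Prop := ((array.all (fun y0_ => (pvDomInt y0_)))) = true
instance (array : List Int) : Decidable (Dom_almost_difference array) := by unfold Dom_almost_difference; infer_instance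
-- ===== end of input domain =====

-- B drops A's dict/prefix-sum bookkeeping and instead sums y - x over all (earlier, later)
-- pairs whose absolute difference is not 1, by a plain nested scan (simpler, not faster).

-- ===== PORT A =====
-- one iteration of A's loop: i is the range index, x = array[i]
def adStepA (s : PySem.Dict Int Int × Int × Int) (i x : Int) :
    PySem.Dict Int Int × Int × Int :=
  let d0 := s.1
  let d1 := if d0.contains x then d0 else d0.insert x 0
  let d2 := if d1.contains (x - 1) then d1 else d1.insert (x - 1) 0
  let d3 := if d2.contains (x + 1) then d2 else d2.insert (x + 1) 0
  let ad := s.2.1 + i * x - s.2.2 + d3.getD (x + 1) 0 - d3.getD (x - 1) 0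
  (d3.modify x 0 (· + 1), ad, s.2.2 + x)

def almost_difference (array : List Int) : Int :=
  let n : Int := PySem.List.len array
  if n == 1 then 0
  else
    ((PySem.List.pyRange 0 n 1).foldl
      (fun s i => adStepA s i (PySem.List.pyGetD array i 0))
      (PySem.Dict.empty, 0, 0)).2.1

-- ===== PORT B =====
-- B's state is (prefix, total); the inner loop scans the prefix of earlier elements
def adStepB (s : List Int × Int) (y : Int) : List Int × Int :=
  (s.1 ++ [y],
   s.1.foldl (fun t x => if (y - x).natAbs ≠ 1 then t + (y - x) else t) s.2)

def almost_difference_alt (array : List Int) : Int :=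
  (array.foldl adStepB ([], 0)).2

-- ===== PRECONDITION & SPEC =====
def Spec_almost_difference (array : List Int) (out : Int) : Prop := out = almost_difference_alt array
instance (array : List Int) (out : Int) : Decidable (Spec_almost_difference array out) := by unfold Spec_almost_difference; infer_instance

-- ===== CLAIM (what is proved, stated in full; the proofs are below) =====
def Claim_equal_almost_difference : Prop := ∀ (array : List Int), Dom_almost_difference array → Spec_almost_difference array (almost_difference array)

-- ===== LEMMAS AND PROOFS =====

-- contribution of the pair (x earlier, y later)
def gAdj (x y : Int) : Int := if (y - x).natAbs ≠ 1 then y - x else 0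

-- sum of gAdj over all ordered pairs (earlier, later)
def pairSum : List Int → Int
  | [] => 0
  | x :: xs => (xs.map (gAdj x)).sum + pairSum xs

lemma pairSum_append (l : List Int) (y : Int) :
    pairSum (l ++ [y]) = pairSum l + (l.map (fun x => gAdj x y)).sum := by
  induction l with
  | nil => simp [pairSum]
  | cons a l ih => simp [pairSum, ih]; ring

lemma gAdj_natAbs_iff (a y : Int) : ((y - a).natAbs ≠ 1) ↔ ¬(a = y - 1 ∨ a = y + 1) := by omega

lemma gAdj_closed (a y : Int) : gAdj a y
    = (y - a) + (if a = y + 1 then (1:Int) else 0) - (if a = y - 1 then 1 else 0) := by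
  unfold gAdj
  rw [if_congr (gAdj_natAbs_iff a y) rfl rfl]
  by_cases h1 : a = y + 1 <;> by_cases h2 : a = y - 1 <;> simp [h1, h2] <;> omega

-- the pairwise contributions of y against the prefix l, in closed form
lemma map_gAdj_sum (l : List Int) (y : Int) :
    (l.map (fun x => gAdj x y)).sum
      = (l.length : Int) * y - l.sum + (l.count (y + 1) : Int) - (l.count (y - 1) : Int) := by
  induction l with
  | nil => simp
  | cons a l ih =>
    rw [List.map_cons, List.sum_cons, gAdj_closed a y, ih]
    simp only [List.count_cons, List.length_cons, List.sum_cons, beq_iff_eq]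
    push_cast
    split_ifs <;> linarith

def adFoldA (l : List Int) : PySem.Dict Int Int × Int × Int :=
  (PySem.List.enumerate l 0).foldl (fun s p => adStepA s p.1 p.2) (PySem.Dict.empty, 0, 0)

lemma foldA_eq_enumerate (l : List Int) :
    ((PySem.List.pyRange 0 (PySem.List.len l) 1).foldl
      (fun s i => adStepA s i (PySem.List.pyGetD l i 0))
      (PySem.Dict.empty, 0, 0)) = adFoldA l := by
  unfold adFoldA
  conv_rhs => rw [PySem.List.enumerate_eq_map_pyRange (d := 0), List.foldl_map]

-- the conditional zero-padding inserts of A never change any getD _ 0 value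
lemma getD_padInsert (d : PySem.Dict Int Int) (y k : Int) :
    (if d.contains y then d else d.insert y 0).getD k 0 = d.getD k 0 := by
  cases hc : d.contains y with
  | true => simp
  | false =>
    simp only [Bool.false_eq_true, if_false, PySem.Dict.getD_insert]
    split_ifs with hk
    · subst hk; exact (PySem.Dict.getD_of_not_contains d 0 hc).symm
    · rfl

-- A's loop invariant: the dict holds true counts, prev_sum the prefix sum, ad_sum the pair sum
lemma adInvA (l : List Int) :
    (∀ k, (adFoldA l).1.getD k 0 = (l.count k : Int)) ∧
    (adFoldA l).2.2 = l.sum ∧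
    (adFoldA l).2.1 = pairSum l := by
  induction l using List.reverseRecOn with
  | nil =>
    refine ⟨?_, ?_, ?_⟩ <;> simp [adFoldA, pairSum, PySem.List.enumerate_nil]
  | append_singleton l y ih =>
    obtain ⟨hA, hprev, had⟩ := ih
    have hAe : adFoldA (l ++ [y]) = adStepA (adFoldA l) (l.length : Int) y := by
      unfold adFoldA
      simp [PySem.List.enumerate_append, PySem.List.enumerate_cons]
    refine ⟨?_, ?_, ?_⟩
    · intro k
      rw [hAe]
      simp only [adStepA, PySem.Dict.getD_modify, getD_padInsert]
      rw [List.count_append]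
      split_ifs with hk
      · subst hk; simp [hA]
      · simp [hA, Ne.symm hk]
    · rw [hAe]
      simp only [adStepA]
      rw [hprev]; simp
    · rw [hAe]
      simp only [adStepA, getD_padInsert]
      rw [hprev, had, hA, hA, pairSum_append, map_gAdj_sum]
      ring

-- the inner-loop body of B adds exactly gAdj
lemma stepB_fun (y : Int) :
    (fun (t x : Int) => if (y - x).natAbs ≠ 1 then t + (y - x) else t)
      = (fun t x => t + gAdj x y) := by
  funext t x; unfold gAdj; split_ifs <;> simp

-- B's loop invariant: the state is (the prefix scanned so far, its pair sum)
lemma adInvB (l : List Int) :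
    l.foldl adStepB ([], 0) = (l, pairSum l) := by
  induction l using List.reverseRecOn with
  | nil => simp [pairSum]
  | append_singleton l y ih =>
    rw [List.foldl_append, ih]
    simp only [List.foldl_cons, List.foldl_nil, adStepB]
    rw [stepB_fun, PySem.List.foldl_add, pairSum_append]

-- ===== VERDICT (by name: the statement is the Claim_ definition above) =====
theorem almost_difference_spec : Claim_equal_almost_difference := by
  unfold Claim_equal_almost_difference
  intro array _
  unfold Spec_almost_difference almost_difference almost_difference_alt
  rw [adInvB]
  simp only []
  split
  · next h =>
    have hlen : array.length = 1 := by
      simp [PySem.List.len_eq] at h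
      omega
    obtain ⟨x, rfl⟩ : ∃ x, array = [x] := by
      match array, hlen with
      | [x], _ => exact ⟨x, rfl⟩
    simp [pairSum]
  · rw [foldA_eq_enumerate]
    exact (adInvA array).2.2
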